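-- pv_equiv track=rewrite | github.com/ablayed/islamic-ner | api/routes/ner.py | _repair_bio
-- ===== SOURCE A (Python) =====
-- from typing import Any, List, Tuple
--
-- ENTITY_TYPES = {"SCHOLAR", "BOOK", "CONCEPT", "PLACE", "HADITH_REF"}
--
-- def _normalize_label(label: str) -> str:
--     if label == "O":
--         return "O"
--     if "-" not in label:
--         return "O"
--
--     prefix, entity_type = label.split("-", 1)
--     prefix = prefix.upper()
--     entity_type = entity_type.upper()
--     if entity_type == "HADITH":
--         entity_type = "HADITH_REF"
--
--     if prefix not in {"B", "I"}:
--         return "O"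
--     if entity_type not in ENTITY_TYPES:
--         return "O"
--     return f"{prefix}-{entity_type}"
--
-- def _repair_bio(labels: List[str]) -> List[str]:
--     repaired: List[str] = []
--     prev_entity_type = ""
--     prev_is_entity = False
--
--     for raw_label in labels:
--         label = _normalize_label(raw_label)
--         if label == "O":
--             repaired.append("O")
--             prev_entity_type = ""
--             prev_is_entity = False
--             continue
--
--         prefix, entity_type = label.split("-", 1)
--         if prefix == "I" and (not prev_is_entity or prev_entity_type != entity_type):
--             repaired.append(f"B-{entity_type}")
--         else:
--             repaired.append(label)
--
--         prev_entity_type = entity_type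
--         prev_is_entity = True
--
--     return repaired
-- ===== SOURCE B (Python) =====
-- ENTITY_TYPES = {"SCHOLAR", "BOOK", "CONCEPT", "PLACE", "HADITH_REF"}
--
-- def _normalize_label(label: str) -> str:
--     if label == "O":
--         return "O"
--     if "-" not in label:
--         return "O"
--     prefix, entity_type = label.split("-", 1)
--     prefix = prefix.upper()
--     entity_type = entity_type.upper()
--     if entity_type == "HADITH":
--         entity_type = "HADITH_REF"
--     if prefix not in {"B", "I"}:
--         return "O"
--     if entity_type not in ENTITY_TYPES:
--         return "O"
--     return f"{prefix}-{entity_type}"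
--
-- def _repair_bio(labels):
--     # Run-based algorithm: normalize everything first, then segment the
--     # normalized sequence into "O" positions and MAXIMAL RUNS of consecutive
--     # entity labels sharing one entity type.  Inside such a run every label is
--     # already a valid continuation, so only the run's FIRST label can be an
--     # illegal "I-" and is rewritten to "B-"; the rest of the run is copied
--     # verbatim.  This is correct because A rewrites "I-T" exactly when the
--     # previous label is not an entity of type T, i.e. exactly at run heads.
--     norm = [_normalize_label(l) for l in labels]
--     out = []
--     n = len(norm)
--     i = 0
--     while i < n:
--         if norm[i] == "O":
--             out.append("O")
--             i += 1
--             continue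
--         t = norm[i].split("-", 1)[1]
--         j = i + 1
--         while j < n and norm[j] != "O" and norm[j].split("-", 1)[1] == t:
--             j += 1
--         out.append("B-" + t if norm[i].startswith("I") else norm[i])
--         out.extend(norm[i + 1 : j])
--         i = j
--     return out
-- ===== Notes on version B (the rewrite author's own statement) =====
-- stated objective: alternative
-- what changed: B replaces A's per-element pass with threaded prev-state by a run-segmentation algorithm: after normalizing, it scans ahead to find each maximal run of consecutive entity labels of one type, rewrites only the run head (I- becomes B-) and copies the run body verbatim.
import Mathlib
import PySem

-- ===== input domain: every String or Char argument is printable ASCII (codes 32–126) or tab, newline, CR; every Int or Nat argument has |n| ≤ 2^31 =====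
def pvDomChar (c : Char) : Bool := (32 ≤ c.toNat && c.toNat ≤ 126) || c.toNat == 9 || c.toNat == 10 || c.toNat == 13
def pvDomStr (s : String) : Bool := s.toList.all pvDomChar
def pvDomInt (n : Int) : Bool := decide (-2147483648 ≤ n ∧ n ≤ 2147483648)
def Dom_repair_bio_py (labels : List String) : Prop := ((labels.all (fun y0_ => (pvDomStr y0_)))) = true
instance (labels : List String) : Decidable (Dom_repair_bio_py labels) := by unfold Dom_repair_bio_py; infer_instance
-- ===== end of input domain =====

-- B replaces A's per-element pass with threaded prev-state by run segmentation:
-- normalize all labels, then find each maximal run of consecutive same-type entity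
-- labels, rewrite only the run head (I- -> B-) and copy the run body verbatim.

-- ===== PORT A =====
-- shared module helper _normalize_label (used verbatim by both Pythons)
def normalize_label_py (label : String) : String :=
  if label == "O" then "O"
  else if !(PySem.Str.isIn "-" label) then "O"
  else
    let parts := (PySem.Str.splitMax? label "-" 1).getD []   -- sep ≠ "", never none
    let pre := PySem.Str.upper (parts.getD 0 "")
    let et0 := PySem.Str.upper (parts.getD 1 "")
    let et := if et0 == "HADITH" then "HADITH_REF" else et0
    if !(pre == "B" || pre == "I") then "O"
    else if !(et == "SCHOLAR" || et == "BOOK" || et == "CONCEPT" || et == "PLACE" || et == "HADITH_REF") then "O"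
    else PySem.Str.join "" [pre, "-", et]

-- one iteration of A's loop; state = (repaired, prev_entity_type, prev_is_entity)
def repair_bio_step_py (st : List String × String × Bool) (raw_label : String) : List String × String × Bool :=
  let label := normalize_label_py raw_label
  if label == "O" then (st.1 ++ ["O"], "", false)
  else
    let parts := (PySem.Str.splitMax? label "-" 1).getD []
    let pre := parts.getD 0 ""
    let et := parts.getD 1 ""
    let out := if pre == "I" && (!st.2.2 || st.2.1 != et)
               then PySem.Str.join "" ["B-", et] else label
    (st.1 ++ [out], et, true)

def repair_bio_py (labels : List String) : List String :=
  (labels.foldl repair_bio_step_py ([], "", false)).1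

-- ===== PORT B =====
-- label.split("-", 1)[1] : the entity type of a normalized entity label
def pvType (s : String) : String := ((PySem.Str.splitMax? s "-" 1).getD []).getD 1 ""

-- inner while loop of Source B: advance j while norm[j] continues a run of type t
def repair_scan (norm : List String) (t : String) (j : Nat) : Nat :=
  if h : j < norm.length then
    if norm[j] != "O" && pvType norm[j] == t then repair_scan norm t (j + 1) else j
  else j
termination_by norm.length - j

theorem repair_scan_ge (norm : List String) (t : String) (j : Nat) :
    j ≤ repair_scan norm t j := by
  fun_induction repair_scan norm t j <;> omega

-- outer while loop of Source B; norm[i+1:j] is ported as (drop (i+1)).take (j-(i+1)),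
-- exact for these nonnegative, i+1 ≤ j bounds
def repair_outer (norm : List String) (i : Nat) (out : List String) : List String :=
  if h : i < norm.length then
    if norm[i] == "O" then repair_outer norm (i + 1) (out ++ ["O"])
    else
      let t := pvType norm[i]
      let j := repair_scan norm t (i + 1)
      let first := if PySem.Str.startswith norm[i] "I" then PySem.Str.join "" ["B-", t] else norm[i]
      repair_outer norm j (out ++ [first] ++ ((norm.drop (i + 1)).take (j - (i + 1))))
  else out
termination_by norm.length - i
decreasing_by
  · omega
  · have := repair_scan_ge norm (pvType norm[i]) (i + 1); omega

def repair_bio_py_alt (labels : List String) : List String :=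
  repair_outer (labels.map normalize_label_py) 0 []

-- ===== PRECONDITION & SPEC =====
def Spec_repair_bio_py (labels : List String) (out : List String) : Prop := out = repair_bio_py_alt labels
instance (labels : List String) (out : List String) : Decidable (Spec_repair_bio_py labels out) := by unfold Spec_repair_bio_py; infer_instance

-- ===== CLAIM =====
def Claim_equal_repair_bio_py : Prop := ∀ (labels : List String), Dom_repair_bio_py labels → Spec_repair_bio_py labels (repair_bio_py labels)

-- ===== LEMMAS AND PROOFS =====

-- the 11 possible outputs of _normalize_label
def pvNL : List String := ["O", "B-SCHOLAR", "B-BOOK", "B-CONCEPT", "B-PLACE", "B-HADITH_REF",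
                           "I-SCHOLAR", "I-BOOK", "I-CONCEPT", "I-PLACE", "I-HADITH_REF"]

theorem pvJoin_mem (p e : String) (hp : ¬ (!(p == "B" || p == "I")) = true)
    (he : ¬ (!(e == "SCHOLAR" || e == "BOOK" || e == "CONCEPT" || e == "PLACE" || e == "HADITH_REF")) = true) :
    PySem.Str.join "" [p, "-", e] ∈ pvNL := by
  simp only [Bool.not_eq_true', Bool.or_eq_true, beq_iff_eq, Bool.not_eq_false] at hp he
  obtain rfl | rfl := hp <;> obtain (((rfl | rfl) | rfl) | rfl) | rfl := he <;> decide

theorem normalize_mem_NL (l : String) : normalize_label_py l ∈ pvNL := by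
  simp only [normalize_label_py]
  split_ifs with h1 h2 h3 h4 h5 h6
  · decide
  · decide
  · decide
  · decide
  · exact pvJoin_mem _ _ h3 (by decide)
  · decide
  · exact pvJoin_mem _ _ h3 h6

-- A's loop state after having last seen normalized label p
def pvStA (p : String) : String × Bool := if p == "O" then ("", false) else (pvType p, true)

-- A's loop body on an already-normalized label
def pvGstep (st : List String × String × Bool) (label : String) : List String × String × Bool :=
  if label == "O" then (st.1 ++ ["O"], "", false)
  else
    let parts := (PySem.Str.splitMax? label "-" 1).getD []
    let pre := parts.getD 0 ""
    let et := parts.getD 1 ""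
    let out := if pre == "I" && (!st.2.2 || st.2.1 != et)
               then PySem.Str.join "" ["B-", et] else label
    (st.1 ++ [out], et, true)

-- A's emission as a function of (current, previous) normalized labels
def pvEmit2 (q : String × String) : String :=
  if q.1 == "O" then "O"
  else
    let parts := (PySem.Str.splitMax? q.1 "-" 1).getD []
    let pre := parts.getD 0 ""
    let et := parts.getD 1 ""
    if pre == "I" && (q.2 == "O" || pvType q.2 != et)
    then PySem.Str.join "" ["B-", et]
    else q.1

-- zip-with-previous view of A's output
def pvZp (p : String) : List String → List String
  | [] => []
  | x :: xs => pvEmit2 (x, p) :: pvZp x xs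

-- B's head rewrite
def pvFirst (x : String) : String :=
  if PySem.Str.startswith x "I" then PySem.Str.join "" ["B-", pvType x] else x

-- B's run predicate
def pvQ (t : String) (y : String) : Bool := y != "O" && pvType y == t

-- B's algorithm as a structural recursion on the normalized list
def pvG : List String → List String
  | [] => []
  | x :: xs =>
    if x == "O" then "O" :: pvG xs
    else pvFirst x :: (xs.takeWhile (pvQ (pvType x)) ++ pvG (xs.dropWhile (pvQ (pvType x))))
termination_by ns => ns.length
decreasing_by
  · simp
  · have := (List.dropWhile_sublist (l := xs) (p := pvQ (pvType x))).length_le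
    simp; omega

-- pointwise facts about pvEmit2 on normalized labels (finite check over pvNL × pvNL)
theorem pvEmit_facts : ∀ p ∈ pvNL, ∀ x ∈ pvNL, x ≠ "O" →
    ((p = "O" ∨ pvType p ≠ pvType x) → pvEmit2 (x, p) = pvFirst x) ∧
    (p ≠ "O" → pvType p = pvType x → pvEmit2 (x, p) = x) := by decide

theorem pvEmit_O (p : String) : pvEmit2 ("O", p) = "O" := by simp [pvEmit2]

-- core invariant of A's fold
theorem pvCore (ns : List String) : ∀ (rep : List String) (p : String),
    (ns.foldl pvGstep (rep, pvStA p)).1 = rep ++ pvZp p ns := by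
  induction ns with
  | nil => intro rep p; simp [pvZp]
  | cons n ns ih =>
    intro rep p
    by_cases hn : n = "O"
    · subst hn
      have h1 : pvGstep (rep, pvStA p) "O" = (rep ++ ["O"], pvStA "O") := by
        simp [pvGstep, pvStA]
      simp only [List.foldl_cons, h1, ih]
      simp [pvZp, pvEmit_O]
    · have hb : (n == "O") = false := by simp [hn]
      have h1 : pvGstep (rep, pvStA p) n = (rep ++ [pvEmit2 (n, p)], pvStA n) := by
        simp only [pvGstep, pvEmit2, pvStA, hb, Bool.false_eq_true, if_false]
        by_cases hp : p = "O"
        · subst hp; simp [pvType]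
        · simp [pvType, hp]
      simp only [List.foldl_cons, h1, ih]
      simp [pvZp]

-- the inner while loop computes takeWhile's length
theorem pvScan_eq (norm : List String) (t : String) (j : Nat) :
    repair_scan norm t j = j + ((norm.drop j).takeWhile (pvQ t)).length := by
  fun_induction repair_scan norm t j with
  | case1 j h hc ih =>
    rw [List.drop_eq_getElem_cons h] at *
    rw [List.takeWhile_cons_of_pos (by simpa [pvQ] using hc)]
    simp at ih ⊢; omega
  | case2 j h hc =>
    rw [List.drop_eq_getElem_cons h]
    rw [List.takeWhile_cons_of_neg (by simpa [pvQ] using hc)]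
    simp
  | case3 j h =>
    rw [List.drop_eq_nil_of_le (by omega)]
    simp

-- the outer while loop is pvG on the suffix
theorem pvOuter_eq (norm : List String) (i : Nat) (out : List String) :
    repair_outer norm i out = out ++ pvG (norm.drop i) := by
  fun_induction repair_outer norm i out with
  | case1 i out h hO ih =>
    rw [List.drop_eq_getElem_cons h, pvG, if_pos hO, ih]
    simp
  | case2 i out h hO t j first ih =>
    rw [List.drop_eq_getElem_cons h, pvG, if_neg hO, ih]
    have hs := pvScan_eq norm (pvType norm[i]) (i + 1)
    set tw := ((norm.drop (i + 1)).takeWhile (pvQ (pvType norm[i]))) with htw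
    set dw := ((norm.drop (i + 1)).dropWhile (pvQ (pvType norm[i]))) with hdw
    have hsplit : norm.drop (i + 1) = tw ++ dw := (List.takeWhile_append_dropWhile).symm
    have hlen : repair_scan norm (pvType norm[i]) (i + 1) - (i + 1) = tw.length := by omega
    have h1 : (norm.drop (i + 1)).take (repair_scan norm (pvType norm[i]) (i + 1) - (i + 1)) = tw := by
      rw [hlen, hsplit, List.take_left]
    have h2 : norm.drop (repair_scan norm (pvType norm[i]) (i + 1)) = dw := by
      have hd : norm.drop (repair_scan norm (pvType norm[i]) (i + 1))
          = (norm.drop (i + 1)).drop (repair_scan norm (pvType norm[i]) (i + 1) - (i + 1)) := by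
        rw [List.drop_drop]; congr 1; omega
      rw [hd, hlen, hsplit, List.drop_left]
    have hfEq : first = pvFirst norm[i] := rfl
    have hjEq : j = repair_scan norm (pvType norm[i]) (i + 1) := rfl
    rw [hfEq, hjEq, h1, h2]
    simp
  | case3 i out h =>
    rw [List.drop_eq_nil_of_le (by omega)]
    simp [pvG]

-- run lemma: inside a same-type run A copies labels verbatim
theorem pvZp_run (t : String) (run : List String) : ∀ (p : String) (rest : List String),
    (∀ y ∈ run, y ∈ pvNL ∧ pvQ t y) → p ∈ pvNL → p ≠ "O" → pvType p = t →
    pvZp p (run ++ rest) = run ++ pvZp (run.getLastD p) rest := by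
  induction run with
  | nil => intro p rest _ _ _ _; simp
  | cons y run ih =>
    intro p rest hmem hpNL hpO hpt
    have hy := hmem y (by simp)
    have hyO : y ≠ "O" := by
      have := hy.2; simp [pvQ] at this; exact this.1
    have hyt : pvType y = t := by
      have := hy.2; simp [pvQ] at this; exact this.2
    have hemit : pvEmit2 (y, p) = y :=
      ((pvEmit_facts p hpNL y hy.1 hyO).2) hpO (by rw [hpt, hyt])
    simp only [List.cons_append, pvZp, hemit, List.getLastD_cons]
    rw [ih y rest (fun z hz => hmem z (by simp [hz])) hy.1 hyO hyt]

-- B's run recursion equals A's zip-with-previous, by strong induction on length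
theorem pvZp_eq_pvG_aux : ∀ (n : Nat) (ns : List String), ns.length ≤ n →
    (∀ x ∈ ns, x ∈ pvNL) → ∀ p, p ∈ pvNL →
    (p = "O" ∨ pvType p ≠ pvType (ns.headD "O") ∨ ns.headD "O" = "O") →
    pvZp p ns = pvG ns := by
  intro n
  induction n with
  | zero =>
    intro ns hlen _ p _ _
    have : ns = [] := List.eq_nil_of_length_eq_zero (by omega)
    subst this; simp [pvZp, pvG]
  | succ n ih =>
    intro ns hlen hNL p hpNL hbd
    match ns with
    | [] => simp [pvZp, pvG]
    | x :: xs =>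
      by_cases hx : x = "O"
      · subst hx
        rw [pvG, if_pos (by simp)]
        simp only [pvZp, pvEmit_O]
        rw [ih xs (by simp at hlen; omega) (fun z hz => hNL z (by simp [hz])) "O" (by decide)
            (Or.inl rfl)]
      · have hxNL : x ∈ pvNL := hNL x (by simp)
        have hbd' : p = "O" ∨ pvType p ≠ pvType x := by
          rcases hbd with h | h | h
          · exact Or.inl h
          · exact Or.inr (by simpa using h)
          · exact absurd (by simpa using h) hx
        have hemit : pvEmit2 (x, p) = pvFirst x :=
          ((pvEmit_facts p hpNL x hxNL hx).1) hbd'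
        rw [pvG, if_neg (by simp [hx])]
        simp only [pvZp, hemit]
        set t := pvType x with ht
        set run := xs.takeWhile (pvQ t) with hrun
        set rest := xs.dropWhile (pvQ t) with hrest
        have hsplit : xs = run ++ rest := (List.takeWhile_append_dropWhile).symm
        set q := run.getLastD x with hq
        have hL : pvZp x xs = run ++ pvZp q rest := by
          conv_lhs => rw [hsplit]
          exact pvZp_run t run x rest
            (fun y hy => ⟨hNL y (by simp [(List.takeWhile_sublist _).subset (hrun ▸ hy)]),
                          List.mem_takeWhile_imp (hrun ▸ hy)⟩)
            hxNL hx rfl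
        rw [hL]
        refine congrArg (fun l => pvFirst x :: (run ++ l)) ?_
        have hqmem : q ∈ x :: run := List.getLastD_mem_cons
        have hqNL : q ∈ pvNL := by
          rcases List.mem_cons.mp hqmem with h | h
          · exact h ▸ hxNL
          · exact hNL q (by simp [(List.takeWhile_sublist _).subset (hrun ▸ h)])
        have hqO : q ≠ "O" := by
          rcases List.mem_cons.mp hqmem with h | h
          · exact h ▸ hx
          · have := List.mem_takeWhile_imp (hrun ▸ h); simp [pvQ] at this; exact this.1
        have hqt : pvType q = t := by
          rcases List.mem_cons.mp hqmem with h | h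
          · exact h ▸ rfl
          · have := List.mem_takeWhile_imp (hrun ▸ h); simp [pvQ] at this; exact this.2
        have hrlen : rest.length ≤ xs.length := by
          rw [hrest]; exact (List.dropWhile_sublist _).length_le
        apply ih rest (by simp at hlen; omega)
          (fun z hz => hNL z (by simp [(List.dropWhile_sublist _).subset (hrest ▸ hz)]))
          q hqNL
        -- boundary at the run's end
        match hr : rest with
        | [] => simp
        | y :: ys =>
          have hne : List.dropWhile (pvQ t) xs ≠ [] := by rw [← hrest]; simp
          have hfail : pvQ t y = false := by
            have h0 := List.head_dropWhile_not (pvQ t) hne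
            have hhead : (List.dropWhile (pvQ t) xs).head hne = y := by
              simp [← hrest]
            rwa [hhead] at h0
          simp only [pvQ, Bool.and_eq_false_iff] at hfail
          by_cases hyO : y = "O"
          · exact Or.inr (Or.inr (by simp [hyO]))
          · refine Or.inr (Or.inl ?_)
            have hty : pvType y ≠ t := by
              rcases hfail with h | h
              · simp [hyO] at h
              · simpa using h
            simp [hqt]; intro hcon; exact hty hcon.symm

-- ===== VERDICT =====
theorem repair_bio_py_spec : Claim_equal_repair_bio_py := by
  intro labels _
  unfold Spec_repair_bio_py repair_bio_py repair_bio_py_alt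
  rw [pvOuter_eq]
  have hfold : labels.foldl repair_bio_step_py ([], "", false)
      = (labels.map normalize_label_py).foldl pvGstep ([], pvStA "O") := by
    rw [List.foldl_map]; rfl
  rw [hfold, pvCore]
  simp only [List.nil_append, List.drop_zero]
  exact pvZp_eq_pvG_aux (labels.map normalize_label_py).length _ le_rfl
    (fun x hx => by rcases List.mem_map.mp hx with ⟨l, _, rfl⟩; exact normalize_mem_NL l)
    "O" (by decide) (Or.inl rfl)
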